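-- pv_equiv track=rewrite | github.com/catlee/adventofcode | 2018/python/14.py | new_recipes
-- ===== SOURCE A (Python) =====
-- def new_recipes(recipes, current):
--     s = sum(recipes[c] for c in current)
--     retval = []
--     while True:
--         retval.insert(0, s % 10)
--         s //= 10
--         if s == 0:
--             break
--     return retval
-- ===== SOURCE B (Python) =====
-- def new_recipes(recipes, current):
--     s = sum(recipes[c] for c in current)
--     return [int(c) for c in str(s)]
-- ===== Notes on version B (the rewrite author's own statement) =====
-- stated objective: idiomatic
-- what changed: The digit list is produced by converting the sum to its decimal string and mapping int over the characters (left-to-right), instead of a do-while loop repeatedly taking s % 10, s //= 10 and prepending each digit at the front of the list.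
import Mathlib
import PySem

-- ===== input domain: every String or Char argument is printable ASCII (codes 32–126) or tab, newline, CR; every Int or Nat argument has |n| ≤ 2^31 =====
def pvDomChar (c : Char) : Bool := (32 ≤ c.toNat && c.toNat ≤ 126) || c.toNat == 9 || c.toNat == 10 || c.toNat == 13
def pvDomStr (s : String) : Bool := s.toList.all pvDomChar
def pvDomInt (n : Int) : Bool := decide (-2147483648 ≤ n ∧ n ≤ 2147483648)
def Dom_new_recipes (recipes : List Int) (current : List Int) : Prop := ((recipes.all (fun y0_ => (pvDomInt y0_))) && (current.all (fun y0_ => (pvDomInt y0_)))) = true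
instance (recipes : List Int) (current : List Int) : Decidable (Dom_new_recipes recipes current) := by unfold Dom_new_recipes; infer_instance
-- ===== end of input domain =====

-- B replaces A's do-while digit loop (s % 10, s //= 10, insert at the front) by mapping
-- int over the characters of str(s); objective: idiomatic. Equal wherever A returns.

-- ===== PORT A =====
-- A's `while True: retval.insert(0, s % 10); s //= 10; if s == 0: break` loop.
-- Python loops forever when s is negative; those inputs are outside Pre_.  The fuel
-- argument (s.toNat is always enough for 0 ≤ s) only makes the recursion structural,
-- it changes nothing where Python returns.
def digitsLoopA : Nat → Int → List Int → List Int
  | 0, s, acc => PySem.Int.mod s 10 :: acc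
  | fuel + 1, s, acc =>
    if 0 < PySem.Int.floordiv s 10 then
      digitsLoopA fuel (PySem.Int.floordiv s 10) (PySem.Int.mod s 10 :: acc)
    else
      PySem.Int.mod s 10 :: acc

def new_recipes (recipes : List Int) (current : List Int) : List Int :=
  let s := current.foldl (fun a c => a + (PySem.List.pyGet? recipes c).getD 0) 0
  digitsLoopA s.toNat s []

-- ===== PORT B =====
-- B: s = same sum; return [int(c) for c in str(s)].  int(c) raises on '-' in Python;
-- the `.getD 0` is only a totality guard, never reached inside Pre_.
def new_recipes_alt (recipes : List Int) (current : List Int) : List Int :=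
  let s := current.foldl (fun a c => a + (PySem.List.pyGet? recipes c).getD 0) 0
  (PySem.Int.toChars s).map (fun c => (PySem.Int.ofChars? [c]).getD 0)

-- ===== PRECONDITION & SPEC =====
-- Pre_ excludes exactly the inputs on which A does not return: an index in `current` out of
-- range for `recipes` (IndexError) and a negative sum (A's do-while loop never terminates).
def Pre_new_recipes (recipes : List Int) (current : List Int) : Prop :=
  (∀ c ∈ current, -(recipes.length : Int) ≤ c ∧ c < recipes.length) ∧
  0 ≤ (current.map (fun c => (PySem.List.pyGet? recipes c).getD 0)).sum
instance (recipes : List Int) (current : List Int) : Decidable (Pre_new_recipes recipes current) := by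
  unfold Pre_new_recipes; infer_instance

def pvWitness_new_recipes : List Int × List Int := ([3, 7], [0, 1])

def Spec_new_recipes (recipes : List Int) (current : List Int) (out : List Int) : Prop := out = new_recipes_alt recipes current
instance (recipes : List Int) (current : List Int) (out : List Int) : Decidable (Spec_new_recipes recipes current out) := by unfold Spec_new_recipes; infer_instance

-- ===== CLAIM (what is proved, stated in full; the proofs are below) =====
def Claim_equal_new_recipes : Prop := ∀ (recipes : List Int) (current : List Int), Dom_new_recipes recipes current → Pre_new_recipes recipes current → Spec_new_recipes recipes current (new_recipes recipes current)

-- ===== LEMMAS AND PROOFS =====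

lemma digitVal_digitChar (m : Nat) (h : m < 10) :
    (PySem.Int.ofChars? [Nat.digitChar m]).getD 0 = (m : Int) := by
  interval_cases m <;> decide

lemma digitsLoopA_append (fuel : Nat) : ∀ (n : Nat), n ≤ fuel → ∀ (acc : List Int),
    digitsLoopA fuel (n : Int) acc = digitsLoopA fuel (n : Int) [] ++ acc := by
  induction fuel with
  | zero => intro n _ acc; simp [digitsLoopA]
  | succ fuel ih =>
    intro n hn acc
    have hfd : PySem.Int.floordiv (n : Int) 10 = ((n / 10 : Nat) : Int) := by
      exact_mod_cast PySem.Int.floordiv_natCast n 10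
    simp only [digitsLoopA, hfd]
    by_cases h : 0 < n / 10
    · have hle : n / 10 ≤ fuel := by omega
      rw [if_pos (by exact_mod_cast h), if_pos (by exact_mod_cast h)]
      rw [ih (n / 10) hle (PySem.Int.mod (n : Int) 10 :: acc),
          ih (n / 10) hle [PySem.Int.mod (n : Int) 10]]
      simp
    · rw [if_neg (by exact_mod_cast h), if_neg (by exact_mod_cast h)]
      simp

lemma toDigits_map_eq_digitsLoopA (fuel : Nat) : ∀ (n : Nat), n ≤ fuel →
    (Nat.toDigits 10 n).map (fun c => (PySem.Int.ofChars? [c]).getD 0)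
      = digitsLoopA fuel (n : Int) [] := by
  induction fuel with
  | zero =>
    intro n hn
    have : n = 0 := by omega
    subst this
    simp only [Nat.toDigits_zero, digitsLoopA]
    decide
  | succ fuel ih =>
    intro n hn
    have hfd : PySem.Int.floordiv (n : Int) 10 = ((n / 10 : Nat) : Int) := by
      exact_mod_cast PySem.Int.floordiv_natCast n 10
    have hmd : PySem.Int.mod (n : Int) 10 = ((n % 10 : Nat) : Int) := by
      exact_mod_cast PySem.Int.mod_natCast n 10
    rw [Nat.toDigits_eq_if (by norm_num)]
    simp only [digitsLoopA, hfd]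
    by_cases h : n < 10
    · have h0 : n / 10 = 0 := Nat.div_eq_of_lt h
      rw [if_pos h, h0, if_neg (by norm_num)]
      rw [hmd, Nat.mod_eq_of_lt h]
      simp [digitVal_digitChar n h]
    · have h10 : 10 ≤ n := by omega
      have hpos : 0 < n / 10 := Nat.div_pos h10 (by norm_num)
      have hle : n / 10 ≤ fuel := by omega
      rw [if_neg h, if_pos (by exact_mod_cast hpos)]
      rw [digitsLoopA_append fuel (n / 10) hle [PySem.Int.mod (n : Int) 10]]
      rw [List.map_append, ih (n / 10) hle, hmd]
      simp [digitVal_digitChar (n % 10) (Nat.mod_lt n (by norm_num))]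

lemma digits_eq (s : Int) (hs : 0 ≤ s) :
    digitsLoopA s.toNat s [] = (PySem.Int.toChars s).map (fun c => (PySem.Int.ofChars? [c]).getD 0) := by
  obtain ⟨n, rfl⟩ : ∃ n : Nat, s = (n : Int) := ⟨s.toNat, (Int.toNat_of_nonneg hs).symm⟩
  have htc : PySem.Int.toChars (n : Int) = Nat.toDigits 10 n := by
    simp [PySem.Int.toChars]
  rw [htc, Int.toNat_natCast]
  exact (toDigits_map_eq_digitsLoopA n n le_rfl).symm

-- ===== VERDICT (by name: the statement is the Claim_ definition above) =====
theorem new_recipes_spec : Claim_equal_new_recipes := by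
  intro recipes current _ hpre
  obtain ⟨-, hsum⟩ := hpre
  unfold Spec_new_recipes new_recipes new_recipes_alt
  exact digits_eq _ (by rw [PySem.List.foldl_add]; simpa using hsum)
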